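-- pv_equiv track=rewrite | github.com/Jakub21/SnakeTheGame | main.py | add_perimeter0
-- ===== SOURCE A (Python) =====
-- def add_perimeter0(map0, map_size):
-- 	for incr0 in range(map_size):
-- 		if incr0 < width:
-- 			map0[incr0] = char_wall
-- 		elif incr0 %width == 0:
-- 			map0[incr0] = char_wall
-- 		elif incr0 %width == width-1:
-- 			map0[incr0] = char_wall
-- 		elif incr0 > map_size -width:
-- 			map0[incr0] = char_wall
-- 	return map0
--
-- char_wall = 87
--
-- width = 12
-- ===== SOURCE B (Python) =====
-- char_wall = 87
--
-- width = 12
--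
-- def add_perimeter0(map0, map_size):
--     # Bulk slice assignments instead of a per-cell scan: the top strip, the two
--     # side columns as extended slices with step `width`, and the bottom strip.
--     # Mutates map0 in place like the original and returns it.
--     top = min(map_size, width)
--     if top > 0:
--         map0[0:top] = [char_wall] * top
--     if map_size > width:
--         map0[width:map_size:width] = [char_wall] * len(range(width, map_size, width))
--     if map_size > 2 * width - 1:
--         map0[2 * width - 1:map_size:width] = [char_wall] * len(range(2 * width - 1, map_size, width))
--     lo = max(width, map_size - width + 1)
--     if lo < map_size:
--         map0[lo:map_size] = [char_wall] * (map_size - lo)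
--     return map0
-- ===== Notes on version B (the rewrite author's own statement) =====
-- stated objective: faster
-- what changed: Instead of scanning every index in range(map_size) and testing four conditions per cell, B writes the perimeter in four bulk slice assignments: the top strip, the two side columns as step-width extended slices, and the bottom strip.
import Mathlib
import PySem

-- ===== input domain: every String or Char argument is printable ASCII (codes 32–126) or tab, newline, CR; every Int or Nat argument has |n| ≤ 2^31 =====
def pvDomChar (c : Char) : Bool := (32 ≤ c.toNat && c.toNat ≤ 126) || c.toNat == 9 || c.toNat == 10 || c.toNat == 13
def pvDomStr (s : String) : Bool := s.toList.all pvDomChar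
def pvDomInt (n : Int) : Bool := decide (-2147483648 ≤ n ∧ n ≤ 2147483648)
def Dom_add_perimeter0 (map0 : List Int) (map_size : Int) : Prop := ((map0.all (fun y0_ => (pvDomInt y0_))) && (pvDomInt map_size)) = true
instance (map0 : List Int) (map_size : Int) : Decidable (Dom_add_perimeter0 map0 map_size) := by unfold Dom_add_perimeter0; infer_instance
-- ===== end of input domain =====

-- B writes only the perimeter indices (top strip, two step-12 columns, bottom strip) instead of
-- scanning every cell; both programs mutate map0 in place in Python in the same way, the theorems
-- are about the returned list.

-- ===== PORT A =====
-- per-cell scan over range(map_size); pySetD is exact here because Pre_ keeps every written index in range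
def add_perimeter0 (map0 : List Int) (map_size : Int) : List Int :=
  (PySem.List.pyRange 0 map_size 1).foldl (fun m incr0 =>
    if incr0 < 12 then PySem.List.pySetD m incr0 87
    else if PySem.Int.mod incr0 12 = 0 then PySem.List.pySetD m incr0 87
    else if PySem.Int.mod incr0 12 = 11 then PySem.List.pySetD m incr0 87
    else if incr0 > map_size - 12 then PySem.List.pySetD m incr0 87
    else m) map0

-- ===== PORT B =====
-- bulk slice assignments, one helper per statement of Source B; each contiguous slice assignment
-- 'map0[a:b] = [87]*(b-a)' is ported as take/replicate/drop (exact here: under Pre_ the assigned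
-- list's length equals the slice's length), and each extended slice
-- 'map0[a:map_size:12] = [87]*len(range(a,map_size,12))' as the write of 87 at exactly those
-- indices (exact under Pre_, where the slice's extent is len(range(a,map_size,12)))
def pvStep1 (m : List Int) (map_size : Int) : List Int :=
  if 0 < min map_size 12 then
    List.replicate (min map_size 12).toNat 87 ++ m.drop (min map_size 12).toNat
  else m

def pvStep2 (m : List Int) (map_size : Int) : List Int :=
  if 12 < map_size then
    (PySem.List.pyRange 12 map_size 12).foldl (fun acc i => PySem.List.pySetD acc i 87) m
  else m

def pvStep3 (m : List Int) (map_size : Int) : List Int :=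
  if 23 < map_size then
    (PySem.List.pyRange 23 map_size 12).foldl (fun acc i => PySem.List.pySetD acc i 87) m
  else m

def pvStep4 (m : List Int) (map_size : Int) : List Int :=
  if max 12 (map_size - 11) < map_size then
    m.take (max 12 (map_size - 11)).toNat ++
      (List.replicate (map_size - max 12 (map_size - 11)).toNat 87 ++ m.drop map_size.toNat)
  else m

def add_perimeter0_alt (map0 : List Int) (map_size : Int) : List Int :=
  pvStep4 (pvStep3 (pvStep2 (pvStep1 map0 map_size) map_size) map_size) map_size

-- ===== PRECONDITION & SPEC =====
-- A raises IndexError exactly when map_size > len(map0) (some perimeter index is out of range);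
-- Pre_ is exactly the inputs on which the Python A returns.
def Pre_add_perimeter0 (map0 : List Int) (map_size : Int) : Prop :=
  map_size ≤ (map0.length : Int)
instance (map0 : List Int) (map_size : Int) : Decidable (Pre_add_perimeter0 map0 map_size) := by
  unfold Pre_add_perimeter0; infer_instance

def pvWitness_add_perimeter0 : List Int × Int :=
  ([0, 1, 2, 3, 4, 5, 6, 7, 8, 9, 10, 11, 12, 13], 14)

def Spec_add_perimeter0 (map0 : List Int) (map_size : Int) (out : List Int) : Prop := out = add_perimeter0_alt map0 map_size
instance (map0 : List Int) (map_size : Int) (out : List Int) : Decidable (Spec_add_perimeter0 map0 map_size out) := by unfold Spec_add_perimeter0; infer_instance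

-- ===== CLAIM (what is proved, stated in full; the proofs are below) =====
def Claim_equal_add_perimeter0 : Prop := ∀ (map0 : List Int) (map_size : Int), Dom_add_perimeter0 map0 map_size → Pre_add_perimeter0 map0 map_size → Spec_add_perimeter0 map0 map_size (add_perimeter0 map0 map_size)

-- ===== LEMMAS AND PROOFS =====

-- all written indices, folded one after the other
def pvWriteAll (xs : List Int) (idxs : List Int) : List Int :=
  idxs.foldl (fun m i => PySem.List.pySetD m i 87) xs

-- the condition of A's if/elif chain, as one Bool
def pvCondA (n i : Int) : Bool :=
  decide (i < 12) || decide (PySem.Int.mod i 12 = 0) ||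
  decide (PySem.Int.mod i 12 = 11) || decide (i > n - 12)

theorem pvBodyA_eq (n : Int) :
    (fun (m : List Int) incr0 =>
      if incr0 < 12 then PySem.List.pySetD m incr0 87
      else if PySem.Int.mod incr0 12 = 0 then PySem.List.pySetD m incr0 87
      else if PySem.Int.mod incr0 12 = 11 then PySem.List.pySetD m incr0 87
      else if incr0 > n - 12 then PySem.List.pySetD m incr0 87
      else m)
    = (fun m i => if pvCondA n i then PySem.List.pySetD m i 87 else m) := by
  funext m i
  by_cases h1 : i < 12 <;> by_cases h2 : PySem.Int.mod i 12 = 0 <;>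
    by_cases h3 : PySem.Int.mod i 12 = 11 <;> by_cases h4 : i > n - 12 <;>
    simp [pvCondA, h1, h4] <;> split_ifs <;> tauto

theorem pvFoldl_ite (p : Int → Bool) (xs : List Int) (init : List Int) :
    xs.foldl (fun m i => if p i then PySem.List.pySetD m i 87 else m) init
    = pvWriteAll init (xs.filter p) := by
  induction xs generalizing init with
  | nil => rfl
  | cons i t ih =>
      simp only [List.foldl_cons, List.filter_cons]
      cases hp : p i <;> simp [pvWriteAll, ih]

theorem pvWriteAll_getElem? (idxs : List Int) (xs : List Int)
    (h : ∀ i ∈ idxs, 0 ≤ i ∧ i < (xs.length : Int)) (j : Nat) :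
    (pvWriteAll xs idxs)[j]? = if (j : Int) ∈ idxs then some 87 else xs[j]? := by
  induction idxs generalizing xs with
  | nil => simp [pvWriteAll]
  | cons i t ih =>
      have hi := h i (by simp)
      have hset : PySem.List.pySetD xs i 87 = xs.set i.toNat 87 :=
        PySem.List.pySetD_of_nonneg xs 87 hi.1
      have h' : ∀ k ∈ t, 0 ≤ k ∧ k < ((xs.set i.toNat 87).length : Int) := by
        intro k hk; simpa using h k (by simp [hk])
      have := ih (xs.set i.toNat 87) h'
      simp only [pvWriteAll, List.foldl_cons] at *
      rw [hset, this]
      by_cases hjt : (j : Int) ∈ t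
      · simp [hjt]
      · have hlen : i.toNat < xs.length := by omega
        rw [if_neg hjt]
        by_cases hji : (j : Int) = i
        · have hnat : i.toNat = j := by omega
          rw [if_pos (by simp [hji]), List.getElem?_set]
          simp [hnat]
          omega
        · have hnat : i.toNat ≠ j := by omega
          rw [if_neg (by simp [hjt, hji]), List.getElem?_set]
          simp [hnat]

theorem pvMemIff (n : Int) (j : Nat) :
    ((j : Int) ∈ (PySem.List.pyRange 0 n 1).filter (fun i => pvCondA n i)) ↔
    ((j : Int) ∈ PySem.List.pyRange 0 (min n 12) 1 ++
        (PySem.List.pyRange 12 n 12 ++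
          (PySem.List.pyRange 23 n 12 ++
            PySem.List.pyRange (max 12 (n - 11)) n 1))) := by
  have h12 : (0 : Int) < 12 := by norm_num
  simp only [List.mem_filter, List.mem_append, PySem.List.mem_pyRange_one,
    PySem.List.mem_pyRange_iff_of_pos h12, pvCondA, Bool.or_eq_true, decide_eq_true_eq,
    PySem.Int.mod_eq_emod_of_pos h12]
  omega

theorem pvWriteAll_length (idxs : List Int) (xs : List Int) :
    (pvWriteAll xs idxs).length = xs.length := by
  induction idxs generalizing xs with
  | nil => rfl
  | cons i t ih =>
      simp only [pvWriteAll, List.foldl_cons] at *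
      rw [ih, PySem.List.length_pySetD]

-- a contiguous block write equals the per-index writes over the same range
theorem pvContig (xs : List Int) (a b : Int) (h0 : 0 ≤ a) (hab : a ≤ b)
    (hb : b ≤ (xs.length : Int)) :
    xs.take a.toNat ++ (List.replicate (b - a).toNat 87 ++ xs.drop b.toNat)
      = pvWriteAll xs (PySem.List.pyRange a b 1) := by
  have hmem : ∀ i ∈ PySem.List.pyRange a b 1, 0 ≤ i ∧ i < (xs.length : Int) := by
    intro i hi
    rw [PySem.List.mem_pyRange_one] at hi
    omega
  apply List.ext_getElem?
  intro j
  rw [pvWriteAll_getElem? _ _ hmem j]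
  have hta : (xs.take a.toNat).length = a.toNat := by
    rw [List.length_take]; omega
  by_cases hja : j < a.toNat
  · rw [List.getElem?_append_left (by omega), List.getElem?_take, if_pos hja,
      if_neg (by rw [PySem.List.mem_pyRange_one]; omega)]
  · rw [List.getElem?_append_right (by omega), hta]
    by_cases hjb : j < b.toNat
    · rw [List.getElem?_append_left (by rw [List.length_replicate]; omega),
        List.getElem?_replicate, if_pos (by omega),
        if_pos (by rw [PySem.List.mem_pyRange_one]; omega)]
    · rw [List.getElem?_append_right (by rw [List.length_replicate]; omega),
        List.length_replicate, List.getElem?_drop,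
        if_neg (by rw [PySem.List.mem_pyRange_one]; omega)]
      congr 1
      omega

theorem pvRangeStepNil (a n : Int) (h : n ≤ a) : PySem.List.pyRange a n 12 = [] := by
  apply List.eq_nil_iff_forall_not_mem.mpr
  intro x hx
  have := (PySem.List.mem_pyRange_iff_of_pos (by norm_num : (0:Int) < 12) x).mp hx
  omega

-- ===== VERDICT (by name: the statement is the Claim_ definition above) =====
theorem add_perimeter0_spec : Claim_equal_add_perimeter0 := by
  intro map0 n _ hpre
  unfold Pre_add_perimeter0 at hpre
  unfold Spec_add_perimeter0 add_perimeter0 add_perimeter0_alt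
  rw [pvBodyA_eq, pvFoldl_ite]
  have e1 : pvStep1 map0 n = pvWriteAll map0 (PySem.List.pyRange 0 (min n 12) 1) := by
    unfold pvStep1
    by_cases h : 0 < min n 12
    · rw [if_pos h, ← pvContig map0 0 (min n 12) le_rfl (by omega) (by omega)]
      simp
    · rw [if_neg h, PySem.List.pyRange_one_eq_nil (by omega)]
      rfl
  rw [e1]
  set m1 := pvWriteAll map0 (PySem.List.pyRange 0 (min n 12) 1) with hm1
  have hm1len : (m1.length : Int) = (map0.length : Int) := by
    rw [hm1, pvWriteAll_length]
  have e2 : pvStep2 m1 n = pvWriteAll m1 (PySem.List.pyRange 12 n 12) := by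
    unfold pvStep2
    by_cases h : 12 < n
    · rw [if_pos h]; rfl
    · rw [if_neg h, pvRangeStepNil 12 n (by omega)]; rfl
  rw [e2]
  set m2 := pvWriteAll m1 (PySem.List.pyRange 12 n 12) with hm2
  have hm2len : (m2.length : Int) = (map0.length : Int) := by
    rw [hm2, pvWriteAll_length]; exact hm1len
  have e3 : pvStep3 m2 n = pvWriteAll m2 (PySem.List.pyRange 23 n 12) := by
    unfold pvStep3
    by_cases h : 23 < n
    · rw [if_pos h]; rfl
    · rw [if_neg h, pvRangeStepNil 23 n (by omega)]; rfl
  rw [e3]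
  set m3 := pvWriteAll m2 (PySem.List.pyRange 23 n 12) with hm3
  have hm3len : (m3.length : Int) = (map0.length : Int) := by
    rw [hm3, pvWriteAll_length]; exact hm2len
  have e4 : pvStep4 m3 n = pvWriteAll m3 (PySem.List.pyRange (max 12 (n - 11)) n 1) := by
    unfold pvStep4
    by_cases h : max 12 (n - 11) < n
    · rw [if_pos h, pvContig m3 (max 12 (n - 11)) n (by omega) (by omega) (by omega)]
    · rw [if_neg h, PySem.List.pyRange_one_eq_nil (by omega)]
      rfl
  rw [e4, hm3, hm2, hm1]
  rw [show ∀ a b c d : List Int,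
        pvWriteAll (pvWriteAll (pvWriteAll (pvWriteAll map0 a) b) c) d
          = pvWriteAll map0 (a ++ (b ++ (c ++ d))) from
      fun a b c d => by simp [pvWriteAll, List.foldl_append]]
  have hA : ∀ i ∈ (PySem.List.pyRange 0 n 1).filter (fun i => pvCondA n i),
      0 ≤ i ∧ i < (map0.length : Int) := by
    intro i hi
    have := (List.mem_filter.mp hi).1
    rw [PySem.List.mem_pyRange_one] at this
    omega
  have hB : ∀ i ∈ PySem.List.pyRange 0 (min n 12) 1 ++
      (PySem.List.pyRange 12 n 12 ++
        (PySem.List.pyRange 23 n 12 ++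
          PySem.List.pyRange (max 12 (n - 11)) n 1)), 0 ≤ i ∧ i < (map0.length : Int) := by
    intro i hi
    simp only [List.mem_append, PySem.List.mem_pyRange_one,
      PySem.List.mem_pyRange_iff_of_pos (show (0:Int) < 12 by norm_num)] at hi
    omega
  apply List.ext_getElem?
  intro j
  rw [pvWriteAll_getElem? _ _ hA j, pvWriteAll_getElem? _ _ hB j]
  have hiff := pvMemIff n j
  by_cases hm : (j : Int) ∈ (PySem.List.pyRange 0 n 1).filter (fun i => pvCondA n i)
  · rw [if_pos hm, if_pos (hiff.mp hm)]
  · rw [if_neg hm, if_neg (fun h => hm (hiff.mpr h))]
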